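-- pv_equiv track=rewrite | github.com/twatorowski/kicad-plugin-jlcpcb-bom-pnp | logic.py | group_components
-- ===== SOURCE A (Python) =====
-- def group_components(components: dict, group_by: list[str]):
--     # this will hold the groups of components that have the same group by value
--     group_vals = {}
--     # scan across the components
--     for ref, vals in components.items():
--         # get the grouping value
--         group_val = ", ".join([vals.get(vname, '') for vname in group_by])
--         # create a placeholder
--         if group_val not in group_vals:
--             group_vals[group_val] = []
--         # append the component to the group
--         group_vals[group_val].append(ref)
--
--     # return the groups
--     return {", ".join(refs): [components[ref] for ref in refs]
--         for refs in group_vals.values() }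
-- ===== SOURCE B (Python) =====
-- def group_components(components: dict, group_by: list[str]):
--     # one pass: the grouping key of every component, in insertion order
--     key_of = {ref: ", ".join(vals.get(vname, '') for vname in group_by)
--               for ref, vals in components.items()}
--     # first-occurrence scan: emit each group the first time its key shows up
--     out = {}
--     seen = []
--     for ref, key in key_of.items():
--         if key in seen:
--             continue
--         seen.append(key)
--         sel = [r for r, k in key_of.items() if k == key]
--         out[", ".join(sel)] = [components[r] for r in sel]
--     return out
-- ===== Notes on version B (the rewrite author's own statement) =====
-- stated objective: alternative
-- what changed: A buckets refs into a dict keyed by the concatenated grouping value and then emits the buckets; B keeps no buckets: it precomputes each component's grouping key once, then does a first-occurrence scan that emits each group directly by filtering the key map.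
import Mathlib
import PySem

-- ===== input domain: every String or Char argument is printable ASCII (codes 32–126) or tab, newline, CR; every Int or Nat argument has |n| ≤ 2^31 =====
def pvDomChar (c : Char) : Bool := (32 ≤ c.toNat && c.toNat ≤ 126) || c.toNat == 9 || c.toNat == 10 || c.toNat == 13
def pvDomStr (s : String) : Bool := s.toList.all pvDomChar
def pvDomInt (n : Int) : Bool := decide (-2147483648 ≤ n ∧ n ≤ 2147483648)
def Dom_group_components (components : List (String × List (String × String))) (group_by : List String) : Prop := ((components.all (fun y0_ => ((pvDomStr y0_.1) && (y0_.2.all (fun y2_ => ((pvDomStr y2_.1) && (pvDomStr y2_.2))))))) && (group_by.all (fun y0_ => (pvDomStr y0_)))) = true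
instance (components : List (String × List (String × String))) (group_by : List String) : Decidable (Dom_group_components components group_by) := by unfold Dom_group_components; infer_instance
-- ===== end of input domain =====

-- B replaces A's dict-bucket accumulation by a first-occurrence scan that emits each
-- group directly (same output, same order); objective: alternative decomposition.
-- (components[ref] in both Pythons is always a hit, so the ports' `.getD []` default is unreachable.)

-- ===== PORT A =====
def group_components (components : List (String × List (String × String))) (group_by : List String) : List (String × List (List (String × String))) :=
  ((components.foldl (fun gv rv =>
      let group_val := PySem.Str.join ", " (group_by.map (fun vname => (PySem.Dict.mk rv.2).getD vname ""))
      let gv' := if gv.contains group_val then gv else gv.insert group_val []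
      gv'.modify group_val [] (fun refs => refs ++ [rv.1])) PySem.Dict.empty).values.foldl
    (fun (out : PySem.Dict String (List (List (String × String)))) refs =>
      out.insert (PySem.Str.join ", " refs)
        (refs.map (fun r => ((PySem.Dict.mk components).get? r).getD [])))
    PySem.Dict.empty).items

-- ===== PORT B =====
def group_components_alt (components : List (String × List (String × String))) (group_by : List String) : List (String × List (List (String × String))) :=
  let key_of : List (String × String) :=
    components.map (fun rv => (rv.1, PySem.Str.join ", " (group_by.map (fun vname => (PySem.Dict.mk rv.2).getD vname ""))))
  (key_of.foldl
    (fun (st : PySem.Dict String (List (List (String × String))) × List String) p =>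
      if p.2 ∈ st.2 then st
      else
        let sel := (key_of.filter (fun q => q.2 == p.2)).map (fun q => q.1)
        (st.1.insert (PySem.Str.join ", " sel)
           (sel.map (fun r => ((PySem.Dict.mk components).get? r).getD [])),
         st.2 ++ [p.2]))
    (PySem.Dict.empty, [])).1.items

-- ===== PRECONDITION & SPEC =====
def Spec_group_components (components : List (String × List (String × String))) (group_by : List String) (out : List (String × List (List (String × String)))) : Prop := out = group_components_alt components group_by
instance (components : List (String × List (String × String))) (group_by : List String) (out : List (String × List (List (String × String)))) : Decidable (Spec_group_components components group_by out) := by unfold Spec_group_components; infer_instance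

-- ===== CLAIM (what is proved, stated in full; the proofs are below) =====
def Claim_equal_group_components : Prop := ∀ (components : List (String × List (String × String))) (group_by : List String), Dom_group_components components group_by → Spec_group_components components group_by (group_components components group_by)

-- ===== LEMMAS AND PROOFS =====

/-- refs of the components whose grouping key is `k`, in order. -/
def selRefs (pairs : List (String × String)) (k : String) : List String :=
  (pairs.filter (fun q => q.2 == k)).map (fun q => q.1)

/-- keys of `l` in first-appearance order, skipping those already in `seen`. -/
def newKeys : List String → List (String × String) → List String
  | _, [] => []
  | seen, p :: l => if p.2 ∈ seen then newKeys seen l else p.2 :: newKeys (seen ++ [p.2]) l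

theorem newKeys_not_mem (l : List (String × String)) :
    ∀ (seen : List String) (k : String), k ∈ newKeys seen l → k ∉ seen := by
  induction l with
  | nil => intro seen k h; simp [newKeys] at h
  | cons p l ih =>
    intro seen k h
    by_cases hp : p.2 ∈ seen
    · simp [newKeys, hp] at h; exact ih seen k h
    · simp [newKeys, hp] at h
      rcases h with h | h
      · subst h; exact hp
      · intro hk; exact (ih _ k h) (List.mem_append_left _ hk)

theorem newKeys_nodup (l : List (String × String)) :
    ∀ (seen : List String), (newKeys seen l).Nodup := by
  induction l with
  | nil => intro seen; simp [newKeys]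
  | cons p l ih =>
    intro seen
    by_cases hp : p.2 ∈ seen
    · simpa [newKeys, hp] using ih seen
    · rw [newKeys, if_neg hp, List.nodup_cons]
      refine ⟨fun h => ?_, ih _⟩
      exact (newKeys_not_mem l _ _ h) (List.mem_append_right _ (by simp))

/-- inserting a key that is absent twice collapses to one insert. -/
theorem insert_insert_self_of_not_contains
    (d : PySem.Dict String (List String)) (k : String) (v : List String)
    (hc : d.contains k = false) :
    (d.insert k []).insert k v = d.insert k v := by
  have hany : (d.items.any fun p => p.1 == k) = false := hc
  have hall : ∀ p ∈ d.items, (p.1 == k) = false := by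
    simpa [List.any_eq_false] using hany
  have h1 : (d.insert k []).items = d.items ++ [(k, ([] : List String))] := by
    simp [PySem.Dict.insert, PySem.Dict.contains, hany]
  have h2 : (d.insert k []).contains k = true := by
    simp [PySem.Dict.contains, h1]
  apply PySem.Dict.ext
  have hcond : ((d.items ++ [(k, ([] : List String))]).any fun p => p.1 == k) = true := by simp
  simp only [PySem.Dict.insert, PySem.Dict.contains, hany, Bool.false_eq_true, if_false,
    List.map_append, hcond, if_true]
  show List.map (fun p => if (p.1 == k) = true then (k, v) else p) d.items ++
      List.map (fun p => if (p.1 == k) = true then (k, v) else p) [(k, ([] : List String))]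
      = d.items ++ [(k, v)]
  congr 1
  · calc List.map (fun p => if (p.1 == k) = true then (k, v) else p) d.items
        = List.map id d.items := List.map_congr_left (fun p hp => by simp [hall p hp])
      _ = d.items := List.map_id d.items
  · simp

/-- A's "placeholder then append" step is one modify. -/
theorem stepA_eq (d : PySem.Dict String (List String)) (k : String) (r : String) :
    (if d.contains k then d else d.insert k []).modify k [] (fun refs => refs ++ [r])
      = d.modify k [] (fun refs => refs ++ [r]) := by
  by_cases hc : d.contains k = true
  · simp [hc]
  · have hc' : d.contains k = false := by simpa using hc
    simp only [hc', Bool.false_eq_true, if_false]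
    unfold PySem.Dict.modify
    rw [PySem.Dict.getD_insert_self]
    rw [insert_insert_self_of_not_contains d k _ hc']
    have : d.getD k [] = [] := by
      apply PySem.Dict.getD_of_not_contains; exact hc'
    rw [this]

theorem keys_insert (d : PySem.Dict String (List String)) (k : String) (v : List String) :
    (d.insert k v).keys = if d.contains k then d.keys else d.keys ++ [k] := by
  by_cases hc : d.contains k = true
  · simp only [PySem.Dict.insert, hc, if_true, PySem.Dict.keys, List.map_map]
    apply List.map_congr_left
    intro p hp
    by_cases h : p.1 = k
    · simp [h]
    · simp [h]
  · have hc' : d.contains k = false := by simpa using hc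
    simp [PySem.Dict.insert, hc', PySem.Dict.keys]

/-- key list of the bucket fold. -/
theorem keysG (l : List (String × String)) :
    ∀ (d : PySem.Dict String (List String)),
      (l.foldl (fun d p => d.modify p.2 [] (fun refs => refs ++ [p.1])) d).keys
        = d.keys ++ newKeys d.keys l := by
  induction l with
  | nil => intro d; simp [newKeys]
  | cons p l ih =>
    intro d
    simp only [List.foldl_cons]
    rw [ih]
    have hk : (d.modify p.2 [] (fun refs => refs ++ [p.1])).keys
        = if d.contains p.2 then d.keys else d.keys ++ [p.2] := by
      rw [PySem.Dict.keys_modify, keys_insert]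
    have hmem : d.contains p.2 = decide (p.2 ∈ d.keys) :=
      PySem.Dict.contains_eq_decide_mem_keys d p.2
    by_cases hp : p.2 ∈ d.keys
    · rw [hk]; simp [hmem, hp, newKeys]
    · rw [hk]; simp only [hmem, hp, decide_false, Bool.false_eq_true, if_false]
      simp [newKeys, hp, List.append_assoc]

/-- the bucket fold from empty, fully characterised. -/
theorem itemsG (l : List (String × String)) :
    (l.foldl (fun d p => d.modify p.2 [] (fun refs => refs ++ [p.1])) PySem.Dict.empty).items
      = (newKeys [] l).map (fun k => (k, selRefs l k)) := by
  set G := l.foldl (fun d p => d.modify p.2 [] (fun refs => refs ++ [p.1])) PySem.Dict.empty with hG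
  have hkeys : G.keys = newKeys [] l := by
    rw [hG, keysG]; simp [PySem.Dict.empty, PySem.Dict.keys]
  have hnd : G.keys.Nodup := by rw [hkeys]; exact newKeys_nodup l []
  have hgetD : ∀ c, G.getD c [] = selRefs l c := by
    intro c
    have hswap : G = (l.map Prod.swap).foldl (fun d p => d.modify p.1 [] (fun refs => refs ++ [p.2])) PySem.Dict.empty := by
      rw [hG, List.foldl_map]; rfl
    rw [hswap, PySem.Dict.getD_foldl_modify_append, List.filter_map, List.map_map]
    have hf : ((fun p : String × String => p.1 == c) ∘ Prod.swap) = (fun q : String × String => q.2 == c) := rfl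
    have hm : ((fun x : String × String => x.2) ∘ Prod.swap) = (fun q : String × String => q.1) := rfl
    rw [hf, hm]
    simp [selRefs, PySem.Dict.getD, PySem.Dict.get?, PySem.Dict.empty]
  rw [PySem.Dict.items_eq_map_keys G hnd [], hkeys]
  exact List.map_congr_left (fun k _ => by rw [hgetD k])

/-- B's fold with a seen-list is a fold over the fresh keys. -/
theorem foldB (ins : String → PySem.Dict String (List (List (String × String))) → PySem.Dict String (List (List (String × String)))) (l : List (String × String)) :
    ∀ (out : PySem.Dict String (List (List (String × String)))) (seen : List String),
      (l.foldl (fun st p => if p.2 ∈ st.2 then st else (ins p.2 st.1, st.2 ++ [p.2])) (out, seen)).1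
        = (newKeys seen l).foldl (fun o k => ins k o) out := by
  induction l with
  | nil => intro out seen; simp [newKeys]
  | cons p l ih =>
    intro out seen
    by_cases hp : p.2 ∈ seen
    · simp only [List.foldl_cons, hp, if_true, newKeys]
      simpa [hp] using ih out seen
    · simp only [List.foldl_cons, hp, if_false, newKeys]
      simpa [hp] using ih (ins p.2 out) (seen ++ [p.2])

-- ===== VERDICT (by name: the statement is the Claim_ definition above) =====
theorem group_components_spec : Claim_equal_group_components := by
  intro components group_by _
  unfold Spec_group_components group_components group_components_alt
  set key : List (String × String) → String := fun vals =>
    PySem.Str.join ", " (group_by.map (fun vname => (PySem.Dict.mk vals).getD vname "")) with hkey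
  set look : String → List (String × String) := fun r =>
    ((PySem.Dict.mk components).get? r).getD [] with hlook
  set pairs : List (String × String) := components.map (fun rv => (rv.1, key rv.2)) with hpairs
  have hA : components.foldl (fun gv rv =>
      let group_val := key rv.2
      let gv' := if gv.contains group_val then gv else gv.insert group_val []
      gv'.modify group_val [] (fun refs => refs ++ [rv.1])) PySem.Dict.empty
      = pairs.foldl (fun d p => d.modify p.2 [] (fun refs => refs ++ [p.1])) PySem.Dict.empty := by
    rw [hpairs, List.foldl_map]
    apply PySem.List.foldl_congr_mem
    intro gv rv _
    exact stepA_eq gv (key rv.2) rv.1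
  rw [hA]
  have hvals : (pairs.foldl (fun d p => d.modify p.2 [] (fun refs => refs ++ [p.1])) PySem.Dict.empty).values
      = (newKeys [] pairs).map (fun k => selRefs pairs k) := by
    unfold PySem.Dict.values
    rw [itemsG, List.map_map]
    rfl
  show (List.foldl (fun out refs => out.insert (PySem.Str.join ", " refs) (refs.map look)) PySem.Dict.empty
          (List.foldl (fun d p => d.modify p.2 [] (fun refs => refs ++ [p.1])) PySem.Dict.empty pairs).values).items
      = (List.foldl (fun st p => if p.2 ∈ st.2 then st else
            (st.1.insert (PySem.Str.join ", " (selRefs pairs p.2)) ((selRefs pairs p.2).map look), st.2 ++ [p.2]))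
          (PySem.Dict.empty, []) pairs).1.items
  rw [hvals, List.foldl_map,
    foldB (fun k o => o.insert (PySem.Str.join ", " (selRefs pairs k)) ((selRefs pairs k).map look)) pairs PySem.Dict.empty []]
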